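-- pv_equiv track=rewrite | github.com/lenceai/QoR | 2.0.1/src/chat/pdf_chatbot.py | _format_retrieved
-- ===== SOURCE A (Python) =====
-- from typing import List, Dict, Any
--
-- def _format_retrieved(retrieved: List[str], max_chars: int) -> str:
--     # Concatenate bullet items up to max_chars
--     pieces: List[str] = []
--     total = 0
--     for c in retrieved:
--         if not isinstance(c, str):
--             continue
--         item = "- %s" % c.strip()
--         if total + len(item) > max_chars and pieces:
--             break
--         pieces.append(item)
--         total += len(item)
--     return "\n\n".join(pieces)
-- ===== SOURCE B (Python) =====
-- def _format_retrieved(retrieved, max_chars):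
--     # Two-phase: format every string item, build the cumulative-length table,
--     # then slice the fitting prefix (first item always kept).
--     items = ["- " + c.strip() for c in retrieved if isinstance(c, str)]
--     cum = []
--     t = 0
--     for it in items:
--         t += len(it)
--         cum.append(t)
--     k = sum(1 for t in cum if t <= max_chars)
--     if items and k == 0:
--         k = 1
--     return "\n\n".join(items[:k])
-- ===== Notes on version B (the rewrite author's own statement) =====
-- stated objective: alternative
-- what changed: A's single accumulator loop with an early break is replaced by a two-phase decomposition: format all items in one comprehension, build the cumulative-length table, count how many cumulative totals fit (keeping the first item unconditionally) and slice that prefix.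
import Mathlib
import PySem

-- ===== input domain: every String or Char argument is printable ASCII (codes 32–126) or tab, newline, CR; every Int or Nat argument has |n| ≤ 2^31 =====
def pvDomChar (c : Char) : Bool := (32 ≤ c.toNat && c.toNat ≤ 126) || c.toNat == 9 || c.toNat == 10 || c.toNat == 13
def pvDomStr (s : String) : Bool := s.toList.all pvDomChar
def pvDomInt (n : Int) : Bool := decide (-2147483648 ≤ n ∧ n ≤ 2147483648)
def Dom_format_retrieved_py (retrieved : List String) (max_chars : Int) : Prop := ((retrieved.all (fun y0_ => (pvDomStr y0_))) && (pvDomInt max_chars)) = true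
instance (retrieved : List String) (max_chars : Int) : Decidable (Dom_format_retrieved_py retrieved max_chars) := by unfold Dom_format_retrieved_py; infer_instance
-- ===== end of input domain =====

-- B replaces A's accumulator-and-break loop with a two-phase decomposition
-- (format all items, build the cumulative-length table, slice the fitting prefix);
-- objective: alternative.

-- ===== PORT A =====
-- item = "- %s" % c.strip()  (on Chars, so the kernel can reduce)
def pvItemA (c : String) : List Char := '-' :: ' ' :: PySem.Chars.strip c.toList

-- the for-loop with its 'break', state = (pieces, total)
def pvLoopA (max_chars : Int) (cs : List String) (pieces : List (List Char)) (total : Int) : List (List Char) :=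
  match cs with
  | [] => pieces
  | c :: rest =>
    let item := pvItemA c
    if total + (item.length : Int) > max_chars ∧ pieces ≠ [] then pieces
    else pvLoopA max_chars rest (pieces ++ [item]) (total + (item.length : Int))

def format_retrieved_py (retrieved : List String) (max_chars : Int) : String :=
  String.ofList (PySem.Chars.join ['\n', '\n'] (pvLoopA max_chars retrieved [] 0))

-- ===== PORT B =====
-- items = ["- " + c.strip() for c in retrieved]
def pvItemB (c : String) : List Char := '-' :: ' ' :: PySem.Chars.strip c.toList

-- the cum-building loop: running total t, appending each cumulative length
def pvCumB (items : List (List Char)) (t : Int) : List Int :=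
  match items with
  | [] => []
  | x :: r => (t + (x.length : Int)) :: pvCumB r (t + (x.length : Int))

def format_retrieved_py_alt (retrieved : List String) (max_chars : Int) : String :=
  let items := retrieved.map pvItemB
  let cum := pvCumB items 0
  let k := cum.countP (fun t => decide (t ≤ max_chars))   -- sum(1 for t in cum if t <= max_chars)
  let k := if items ≠ [] ∧ k = 0 then 1 else k
  String.ofList (PySem.Chars.join ['\n', '\n'] (items.take k))

-- ===== PRECONDITION & SPEC =====
def Spec_format_retrieved_py (retrieved : List String) (max_chars : Int) (out : String) : Prop := out = format_retrieved_py_alt retrieved max_chars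
instance (retrieved : List String) (max_chars : Int) (out : String) : Decidable (Spec_format_retrieved_py retrieved max_chars out) := by unfold Spec_format_retrieved_py; infer_instance

-- ===== CLAIM (what is proved, stated in full; the proofs are below) =====
def Claim_equal_format_retrieved_py : Prop := ∀ (retrieved : List String) (max_chars : Int), Dom_format_retrieved_py retrieved max_chars → Spec_format_retrieved_py retrieved max_chars (format_retrieved_py retrieved max_chars)

-- ===== LEMMAS AND PROOFS =====
-- proof-side bridge: the budget-prefix selector both programs compute
def pvPrefix (items : List (List Char)) (budget : Int) (first : Bool) : List (List Char) :=
  match items with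
  | [] => []
  | x :: rest =>
    if first = false ∧ budget < (x.length : Int) then []
    else x :: pvPrefix rest (budget - (x.length : Int)) false

-- A's loop from state (pieces, total) appends exactly the budget-prefix of the
-- remaining formatted items ('first' ↔ pieces empty)
theorem pvLoopA_eq (mc : Int) (cs : List String) :
    ∀ (pieces : List (List Char)) (total : Int),
      pvLoopA mc cs pieces total =
        pieces ++ pvPrefix (cs.map pvItemB) (mc - total) pieces.isEmpty := by
  induction cs with
  | nil => intro pieces total; simp [pvLoopA, pvPrefix]
  | cons c rest ih =>
    intro pieces total
    show (if total + ((pvItemA c).length : Int) > mc ∧ pieces ≠ [] then pieces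
          else pvLoopA mc rest (pieces ++ [pvItemA c]) (total + ((pvItemA c).length : Int)))
        = pieces ++ pvPrefix (pvItemB c :: rest.map pvItemB) (mc - total) pieces.isEmpty
    have hItem : pvItemA c = pvItemB c := rfl
    rw [pvPrefix]
    by_cases hb : total + ((pvItemA c).length : Int) > mc ∧ pieces ≠ []
    · rw [if_pos hb]
      rw [if_pos]
      · simp
      · refine ⟨?_, ?_⟩
        · simpa using hb.2
        · rw [← hItem]; omega
    · rw [if_neg hb, ih]
      rw [if_neg]
      · simp only [hItem, List.cons_append, List.nil_append, List.append_assoc]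
        rw [show (pieces ++ [pvItemB c]).isEmpty = false from by simp,
            show mc - (total + ((pvItemB c).length : Int))
              = mc - total - ((pvItemB c).length : Int) from by ring]
      · rw [← hItem]
        rcases Decidable.not_and_iff_not_or_not.mp hb with h | h
        · intro ⟨_, h2⟩; omega
        · intro ⟨h1, _⟩
          simp at h
          simp [h] at h1

-- counting cum entries ≤ b at offset t = counting from 0 against budget b - t
theorem pvCumB_countP (items : List (List Char)) :
    ∀ (t b : Int), (pvCumB items t).countP (fun e => decide (e ≤ b))
      = (pvCumB items 0).countP (fun e => decide (e ≤ b - t)) := by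
  induction items with
  | nil => intro t b; simp [pvCumB]
  | cons x r ih =>
    intro t b
    rw [pvCumB, pvCumB, List.countP_cons, List.countP_cons,
        ih (t + (x.length : Int)) b, ih ((0 : Int) + (x.length : Int)) (b - t)]
    have h1 : b - (t + (x.length : Int)) = b - t - ((0 : Int) + (x.length : Int)) := by ring
    rw [h1]
    congr 1
    simp only [decide_eq_true_eq]
    split_ifs <;> omega

-- every cumulative length starting from offset t is ≥ t
theorem pvCumB_ge (items : List (List Char)) :
    ∀ (t : Int), ∀ e ∈ pvCumB items t, t ≤ e := by
  induction items with
  | nil => simp [pvCumB]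
  | cons x r ih =>
    intro t e he
    rw [pvCumB] at he
    rcases List.mem_cons.mp he with h | h
    · subst h; omega
    · have := ih (t + (x.length : Int)) e h
      omega

-- with first = false the selector is 'take (number of cum entries ≤ budget)'
theorem pvPrefix_false_eq (items : List (List Char)) :
    ∀ b : Int, pvPrefix items b false =
      items.take ((pvCumB items 0).countP (fun t => decide (t ≤ b))) := by
  induction items with
  | nil => intro b; simp [pvPrefix, pvCumB]
  | cons x r ih =>
    intro b
    have hcnt : (pvCumB (x :: r) 0).countP (fun t => decide (t ≤ b))
        = (pvCumB r 0).countP (fun t => decide (t ≤ b - (x.length : Int)))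
          + (if b < (x.length : Int) then 0 else 1) := by
      rw [pvCumB, List.countP_cons, pvCumB_countP r ((0 : Int) + (x.length : Int)) b]
      rw [show b - ((0 : Int) + (x.length : Int)) = b - (x.length : Int) from by ring]
      congr 1
      by_cases h : b < (x.length : Int) <;> simp [h]
    rw [pvPrefix, hcnt]
    by_cases hx : b < (x.length : Int)
    · rw [if_pos ⟨rfl, hx⟩, if_pos hx]
      have hz : (pvCumB r 0).countP (fun t => decide (t ≤ b - (x.length : Int))) = 0 := by
        rw [List.countP_eq_zero]
        intro e he
        have := pvCumB_ge r 0 e he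
        simp; omega
      rw [hz]
      simp
    · rw [if_neg (by intro ⟨_, h⟩; exact hx h), if_neg hx, ih (b - (x.length : Int))]
      simp [List.take_succ_cons]

-- with first = true the selector is B's 'take k' with the k == 0 correction
theorem pvPrefix_true_eq (items : List (List Char)) (b : Int) :
    pvPrefix items b true =
      items.take (if items ≠ [] ∧ (pvCumB items 0).countP (fun t => decide (t ≤ b)) = 0
                  then 1 else (pvCumB items 0).countP (fun t => decide (t ≤ b))) := by
  match items with
  | [] => simp [pvPrefix, pvCumB]
  | x :: r =>
    rw [pvPrefix, if_neg (by intro ⟨h, _⟩; simp at h)]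
    rw [pvPrefix_false_eq]
    have hcnt : (pvCumB (x :: r) 0).countP (fun t => decide (t ≤ b))
        = (pvCumB r 0).countP (fun t => decide (t ≤ b - (x.length : Int)))
          + (if b < (x.length : Int) then 0 else 1) := by
      rw [pvCumB, List.countP_cons, pvCumB_countP r ((0 : Int) + (x.length : Int)) b]
      rw [show b - ((0 : Int) + (x.length : Int)) = b - (x.length : Int) from by ring]
      congr 1
      by_cases h : b < (x.length : Int) <;> simp [h]
    rw [hcnt]
    by_cases hx : b < (x.length : Int)
    · -- first item alone exceeds the budget: k = 0, corrected to 1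
      have hz : (pvCumB r 0).countP (fun t => decide (t ≤ b - (x.length : Int))) = 0 := by
        rw [List.countP_eq_zero]
        intro e he
        have := pvCumB_ge r 0 e he
        simp; omega
      rw [hz, if_pos hx, if_pos ⟨by simp, rfl⟩]
      simp
    · rw [if_neg hx, if_neg (by intro ⟨_, h⟩; omega)]
      simp [List.take_succ_cons]

-- ===== VERDICT (by name: the statement is the Claim_ definition above) =====
theorem format_retrieved_py_spec : Claim_equal_format_retrieved_py := by
  intro retrieved max_chars _
  show format_retrieved_py retrieved max_chars = format_retrieved_py_alt retrieved max_chars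
  unfold format_retrieved_py format_retrieved_py_alt
  rw [pvLoopA_eq]
  rw [show max_chars - 0 = max_chars from by ring]
  rw [show (([] : List (List Char))).isEmpty = true from rfl]
  rw [pvPrefix_true_eq]
  simp
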